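-- pv_equiv track=rewrite | github.com/firewalld/firewalld | src/firewall/core/fw_transaction.py | reverse_rule
-- ===== SOURCE A (Python) =====
-- def reverse_rule(args):
--     """ Inverse valid rule """
--
--     replace_args = {
--         # Append
--         "-A": "-D",
--         "--append": "--delete",
--         # Insert
--         "-I": "-D",
--         "--insert": "--delete",
--         # New chain
--         "-N": "-X",
--         "--new-chain": "--delete-chain",
--     }
--
--     ret_args = args[:]
--
--     for arg in replace_args:
--         try:
--             idx = ret_args.index(arg)
--         except Exception:
--             continue
--
--         if arg in [ "-I", "--insert" ]:
--             # With insert rulenum, then remove it if it is a number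
--             # Opt at position idx, chain at position idx+1, [rulenum] at
--             # position idx+2
--             try:
--                 int(ret_args[idx+2])
--             except Exception:
--                 pass
--             else:
--                 ret_args.pop(idx+2)
--
--         ret_args[idx] = replace_args[arg]
--     return ret_args
-- ===== SOURCE B (Python) =====
-- def _is_int(s):
--     try:
--         int(s)
--     except ValueError:
--         return False
--     return True
--
--
-- def reverse_rule(args):
--     """ Inverse valid rule """
--
--     replace_args = {
--         "-A": "-D",
--         "--append": "--delete",
--         "-I": "-D",
--         "--insert": "--delete",
--         "-N": "-X",
--         "--new-chain": "--delete-chain",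
--     }
--
--     ret_args = args[:]
--
--     # Drop the rule number (if any) two places after the first -I / --insert.
--     for flag in ("-I", "--insert"):
--         if flag in ret_args:
--             i = ret_args.index(flag)
--             if i + 2 < len(ret_args) and _is_int(ret_args[i + 2]):
--                 ret_args.pop(i + 2)
--
--     # Swap the first occurrence of each option flag for its inverse, one pass.
--     seen = set()
--     out = []
--     for x in ret_args:
--         if x in replace_args and x not in seen:
--             seen.add(x)
--             x = replace_args[x]
--         out.append(x)
--     return out
-- ===== Notes on version B (the rewrite author's own statement) =====
-- stated objective: simpler
-- what changed: A walks the six replacement keys in dict order, re-scanning the whole list with list.index for each key and interleaving the rulenum pop; B first drops the rulenum after the first -I/--insert in a small pop phase and then swaps the first occurrence of every flag in a single left-to-right pass with a seen-set.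
import Mathlib
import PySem

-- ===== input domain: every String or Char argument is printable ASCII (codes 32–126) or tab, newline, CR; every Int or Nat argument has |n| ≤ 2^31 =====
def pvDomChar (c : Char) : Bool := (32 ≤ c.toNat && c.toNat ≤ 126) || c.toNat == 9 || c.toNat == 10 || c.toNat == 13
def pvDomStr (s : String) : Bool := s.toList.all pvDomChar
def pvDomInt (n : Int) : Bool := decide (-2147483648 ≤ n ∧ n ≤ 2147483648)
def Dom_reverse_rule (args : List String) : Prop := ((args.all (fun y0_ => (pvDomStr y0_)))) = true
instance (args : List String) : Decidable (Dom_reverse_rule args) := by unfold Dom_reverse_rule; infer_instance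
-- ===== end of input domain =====

-- B replaces A's six sequential list.index scans (with the pop interleaved per key) by a
-- pop phase for the two insert flags followed by ONE left-to-right pass with a seen-set
-- that swaps the first occurrence of every flag (objective: simpler decomposition).

-- ===== PORT A =====
-- A's dict literal, iterated in insertion order ('for arg in replace_args' yields the keys;
-- 'replace_args[arg]' is the paired value, so the loop is a fold over the (key, value) items).
def pvPairsA : List (String × String) :=
  [("-A", "-D"), ("--append", "--delete"), ("-I", "-D"),
   ("--insert", "--delete"), ("-N", "-X"), ("--new-chain", "--delete-chain")]

-- one iteration of A's loop body
def pvStepA (ret : List String) (kv : String × String) : List String :=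
  match PySem.List.index? ret kv.1 with
  | none => ret            -- except Exception: continue
  | some idx =>
    let ret' :=
      if kv.1 = "-I" ∨ kv.1 = "--insert" then
        match PySem.List.pyGet? ret ((idx : Int) + 2) with
        | none => ret      -- IndexError: pass
        | some s =>
          match PySem.Int.ofStr? s with
          | none => ret    -- ValueError: pass
          | some _ => ((PySem.List.pop? ret ((idx : Int) + 2)).map Prod.snd).getD ret
      else ret
    PySem.List.pySetD ret' (idx : Int) kv.2

def reverse_rule (args : List String) : List String := pvPairsA.foldl pvStepA args

-- ===== PORT B =====
def pvDictB : PySem.Dict String String :=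
  PySem.Dict.ofList
    [("-A", "-D"), ("--append", "--delete"), ("-I", "-D"),
     ("--insert", "--delete"), ("-N", "-X"), ("--new-chain", "--delete-chain")]

def pvIsInt (s : String) : Bool := (PySem.Int.ofStr? s).isSome   -- _is_int

-- one iteration of B's 'for flag in ("-I", "--insert")' loop body
def pvPopRuleNum (ret : List String) (flag : String) : List String :=
  if flag ∈ ret then
    let i := (PySem.List.index? ret flag).getD 0
    if h : i + 2 < ret.length then
      if pvIsInt ret[i + 2] then ret.eraseIdx (i + 2) else ret
    else ret
  else ret

-- one iteration of B's 'for x in ret_args' swap loop body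
def pvSwapStep (st : PySem.Set String × List String) (x : String) :
    PySem.Set String × List String :=
  match PySem.Dict.get? pvDictB x with
  | some v => if x ∈ st.1 then (st.1, st.2 ++ [x])
              else (PySem.Set.add st.1 x, st.2 ++ [v])
  | none => (st.1, st.2 ++ [x])

def reverse_rule_alt (args : List String) : List String :=
  let ret := (["-I", "--insert"]).foldl pvPopRuleNum args
  (ret.foldl pvSwapStep (PySem.Set.empty, [])).2

-- ===== PRECONDITION & SPEC =====
def Spec_reverse_rule (args : List String) (out : List String) : Prop := out = reverse_rule_alt args
instance (args : List String) (out : List String) : Decidable (Spec_reverse_rule args out) := by unfold Spec_reverse_rule; infer_instance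

-- ===== CLAIM (what is proved, stated in full; the proofs are below) =====
def Claim_equal_reverse_rule : Prop := ∀ (args : List String), Dom_reverse_rule args → Spec_reverse_rule args (reverse_rule args)

-- ===== LEMMAS AND PROOFS =====

-- "replace the first occurrence of k by v" (the shape of one non-insert iteration of A)
def pvRF (k v : String) (l : List String) : List String :=
  match PySem.List.index? l k with
  | none => l
  | some i => l.set i v

-- A's whole loop once the pops are factored out: each item's replacement in sequence
def pvFoldRF (d : List (String × String)) (l : List String) : List String :=
  d.foldl (fun acc kv => pvRF kv.1 kv.2 acc) l

-- single left-to-right pass replacing the first occurrence of every key of d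
def pvOP : List (String × String) → List String → List String
  | _, [] => []
  | d, x :: xs =>
    match d.find? (fun kv => kv.1 == x) with
    | some kv => kv.2 :: pvOP (d.filter (fun kv => kv.1 != x)) xs
    | none => x :: pvOP d xs

theorem pvRF_cons_self (k v : String) (xs : List String) : pvRF k v (k :: xs) = v :: xs := by
  unfold pvRF
  rw [PySem.List.index?_cons_self]
  rfl

theorem pvRF_cons_ne (k v x : String) (xs : List String) (h : x ≠ k) :
    pvRF k v (x :: xs) = x :: pvRF k v xs := by
  unfold pvRF
  rw [PySem.List.index?_cons_of_ne xs h]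
  cases PySem.List.index? xs k <;> rfl

theorem pvRF_nil (k v : String) : pvRF k v [] = [] := by
  unfold pvRF
  rw [(PySem.List.index?_eq_none_iff ([] : List String) k).2 (by simp)]

-- first-occurrence index survives erasing at a LARGER index
theorem pv_index?_eraseIdx_gt (l : List String) (k : String) (i j : Nat)
    (h : PySem.List.index? l k = some i) (hij : i < j) :
    PySem.List.index? (l.eraseIdx j) k = some i := by
  rcases (PySem.List.index?_eq_some_iff l k i).1 h with ⟨pre, suf, rfl, hlen, hnot⟩
  rw [PySem.List.index?_eq_some_iff]
  refine ⟨pre, suf.eraseIdx (j - (pre.length + 1)), ?_, hlen, hnot⟩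
  have h1 : pre ++ k :: suf = (pre ++ [k]) ++ suf := by simp
  have h2 : (pre ++ [k]).length ≤ j := by simp; omega
  rw [h1, List.eraseIdx_append_of_length_le h2]
  simp

-- first-occurrence index shifts down when erasing at a SMALLER index
theorem pv_index?_eraseIdx_lt (l : List String) (k : String) (p j : Nat)
    (h : PySem.List.index? l k = some p) (hj : j < p) :
    PySem.List.index? (l.eraseIdx j) k = some (p - 1) := by
  rcases (PySem.List.index?_eq_some_iff l k p).1 h with ⟨pre, suf, rfl, hlen, hnot⟩
  rw [PySem.List.index?_eq_some_iff]
  refine ⟨pre.eraseIdx j, suf, ?_, ?_, fun hm => hnot (List.mem_of_mem_eraseIdx hm)⟩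
  · rw [List.eraseIdx_append_of_lt_length (by omega) _]
  · rw [List.length_eraseIdx_of_lt (by omega)]; omega

-- setting a position that holds neither f (old value ≠ f, new value ≠ f) keeps index? f
theorem pv_index?_set_ne (l : List String) (f v : String) (p : Nat)
    (hp : p < l.length) (hk : l[p] ≠ f) (hv : v ≠ f) :
    PySem.List.index? (l.set p v) f = PySem.List.index? l f := by
  induction l generalizing p with
  | nil => simp at hp
  | cons a l ih =>
    cases p with
    | zero =>
      have ha : a ≠ f := by simpa using hk
      simp only [List.set]
      rw [PySem.List.index?_cons_of_ne l hv, PySem.List.index?_cons_of_ne l ha]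
    | succ p =>
      simp only [List.set]
      by_cases haf : a = f
      · subst haf; rw [PySem.List.index?_cons_self, PySem.List.index?_cons_self]
      · rw [PySem.List.index?_cons_of_ne _ haf, PySem.List.index?_cons_of_ne _ haf,
          ih p (by simpa using hp) (by simpa using hk)]

-- a non-insert iteration of A is exactly pvRF
theorem pvStepA_eq_RF (l : List String) (k v : String) (h : ¬(k = "-I" ∨ k = "--insert")) :
    pvStepA l (k, v) = pvRF k v l := by
  simp only [pvStepA, pvRF, if_neg h]
  cases hix : PySem.List.index? l k
  · rfl
  · simp [PySem.List.pySetD_natCast]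

-- an insert iteration of A is: B's pop step, then pvRF
theorem pvStepA_ins (l : List String) (k v : String) (h : k = "-I" ∨ k = "--insert") :
    pvStepA l (k, v) = pvRF k v (pvPopRuleNum l k) := by
  simp only [pvStepA, pvPopRuleNum, if_pos h]
  cases hix : PySem.List.index? l k with
  | none =>
    have hmem : k ∉ l := (PySem.List.index?_eq_none_iff l k).1 hix
    rw [if_neg hmem]
    simp only [pvRF, hix]
  | some i =>
    have hmem : k ∈ l := (PySem.List.index?_isSome_iff l k).1 (by rw [hix]; rfl)
    rw [if_pos hmem]
    simp only [Option.getD_some]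
    have hcast : ((i : Int) + 2) = ((i + 2 : Nat) : Int) := by push_cast; ring
    rw [hcast, PySem.List.pyGet?_natCast]
    by_cases hlen : i + 2 < l.length
    · rw [dif_pos hlen, List.getElem?_eq_getElem hlen]
      cases hint : PySem.Int.ofStr? l[i + 2] with
      | none =>
        simp only [pvIsInt, hint, Option.isSome_none, Bool.false_eq_true, if_false, pvRF, hix,
          PySem.List.pySetD_natCast]
      | some n =>
        have hpi : pvIsInt l[i + 2] = true := by simp [pvIsInt, hint]
        rw [if_pos hpi, PySem.List.pop?_natCast l (i + 2) hlen]
        simp only [Option.map_some, Option.getD_some]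
        have hidx : PySem.List.index? (l.eraseIdx (i + 2)) k = some i :=
          pv_index?_eraseIdx_gt l k i (i + 2) hix (by omega)
        simp only [pvRF, hidx, hint, PySem.List.pySetD_natCast]
    · rw [dif_neg hlen, List.getElem?_eq_none_iff.2 (by omega)]
      simp only [pvRF, hix, PySem.List.pySetD_natCast]

-- how one pop step evaluates, by cases
theorem pvPop_of_not_mem (l : List String) (f : String) (h : f ∉ l) :
    pvPopRuleNum l f = l := by
  simp only [pvPopRuleNum, if_neg h]

theorem pvPop_of_long (l : List String) (f : String) (j : Nat)
    (hif : PySem.List.index? l f = some j) (hlen : ¬ j + 2 < l.length) :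
    pvPopRuleNum l f = l := by
  have hfl : f ∈ l := (PySem.List.index?_isSome_iff l f).1 (by rw [hif]; rfl)
  simp only [pvPopRuleNum, if_pos hfl, hif, Option.getD_some, dif_neg hlen]

theorem pvPop_of_not_int (l : List String) (f : String) (j : Nat)
    (hif : PySem.List.index? l f = some j) (hlen : j + 2 < l.length)
    (hx : pvIsInt (l[j + 2]'hlen) = false) :
    pvPopRuleNum l f = l := by
  have hfl : f ∈ l := (PySem.List.index?_isSome_iff l f).1 (by rw [hif]; rfl)
  simp only [pvPopRuleNum, if_pos hfl, hif, Option.getD_some, dif_pos hlen, hx,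
    Bool.false_eq_true, if_false]

theorem pvPop_of_int (l : List String) (f : String) (j : Nat)
    (hif : PySem.List.index? l f = some j) (hlen : j + 2 < l.length)
    (hx : pvIsInt (l[j + 2]'hlen) = true) :
    pvPopRuleNum l f = l.eraseIdx (j + 2) := by
  have hfl : f ∈ l := (PySem.List.index?_isSome_iff l f).1 (by rw [hif]; rfl)
  simp only [pvPopRuleNum, if_pos hfl, hif, Option.getD_some, dif_pos hlen, hx, if_true]

-- a replacement of a non-int, non-f string by a non-int, non-f string commutes with a pop step
theorem pvPop_RF_comm (l : List String) (k v f : String)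
    (hkf : k ≠ f) (hvf : v ≠ f) (hk : pvIsInt k = false) (hv : pvIsInt v = false) :
    pvPopRuleNum (pvRF k v l) f = pvRF k v (pvPopRuleNum l f) := by
  cases hik : PySem.List.index? l k with
  | none =>
    have hknl : k ∉ l := (PySem.List.index?_eq_none_iff l k).1 hik
    have h1 : pvRF k v l = l := by simp only [pvRF, hik]
    have h2 : k ∉ pvPopRuleNum l f := by
      cases hif : PySem.List.index? l f with
      | none =>
        rw [pvPop_of_not_mem l f ((PySem.List.index?_eq_none_iff l f).1 hif)]; exact hknl
      | some j =>
        by_cases hlen : j + 2 < l.length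
        · by_cases hint : pvIsInt (l[j + 2]'hlen) = true
          · rw [pvPop_of_int l f j hif hlen hint]
            exact fun hm => hknl (List.mem_of_mem_eraseIdx hm)
          · rw [pvPop_of_not_int l f j hif hlen (by simpa using hint)]; exact hknl
        · rw [pvPop_of_long l f j hif hlen]; exact hknl
    have h3 : pvRF k v (pvPopRuleNum l f) = pvPopRuleNum l f := by
      simp only [pvRF, (PySem.List.index?_eq_none_iff _ _).2 h2]
    rw [h1, h3]
  | some p =>
    obtain ⟨hp, hpk, -⟩ := PySem.List.getElem_of_index?_eq_some hik
    have hRF : pvRF k v l = l.set p v := by simp only [pvRF, hik]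
    cases hif : PySem.List.index? l f with
    | none =>
      have hfnl : f ∉ l := (PySem.List.index?_eq_none_iff l f).1 hif
      have hset : PySem.List.index? (l.set p v) f = none := by
        rw [pv_index?_set_ne l f v p hp (by rw [hpk]; exact hkf) hvf, hif]
      rw [hRF, pvPop_of_not_mem _ _ ((PySem.List.index?_eq_none_iff _ _).1 hset),
        pvPop_of_not_mem _ _ hfnl, hRF]
    | some j =>
      have hset : PySem.List.index? (l.set p v) f = some j := by
        rw [pv_index?_set_ne l f v p hp (by rw [hpk]; exact hkf) hvf, hif]
      by_cases hlen : j + 2 < l.length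
      · have hlens : j + 2 < (l.set p v).length := by rw [List.length_set]; exact hlen
        by_cases hpj : p = j + 2
        · have hva : (l.set p v)[j + 2]'hlens = v := by
            subst hpj; simp
          have hlb : (l[j + 2]'hlen) = k := by subst hpj; exact hpk
          rw [hRF, pvPop_of_not_int _ f j hset hlens (by rw [hva]; exact hv),
            pvPop_of_not_int l f j hif hlen (by rw [hlb]; exact hk), hRF]
        · have hva : (l.set p v)[j + 2]'hlens = l[j + 2]'hlen := by
            simp [hpj]
          by_cases hint : pvIsInt (l[j + 2]'hlen) = true
          · rw [hRF, pvPop_of_int _ f j hset hlens (by rw [hva]; exact hint),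
              pvPop_of_int l f j hif hlen hint]
            by_cases hplt : p < j + 2
            · have hie : PySem.List.index? (l.eraseIdx (j + 2)) k = some p :=
                pv_index?_eraseIdx_gt l k p (j + 2) hik hplt
              rw [List.eraseIdx_set, if_neg (by omega), if_neg (by omega)]
              simp only [pvRF, hie]
            · have hie : PySem.List.index? (l.eraseIdx (j + 2)) k = some (p - 1) :=
                pv_index?_eraseIdx_lt l k p (j + 2) hik (by omega)
              rw [List.eraseIdx_set, if_pos (by omega)]
              simp only [pvRF, hie]
          · rw [hRF, pvPop_of_not_int _ f j hset hlens
                (by rw [hva]; simpa using hint),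
              pvPop_of_not_int l f j hif hlen (by simpa using hint), hRF]
      · have hlens : ¬ j + 2 < (l.set p v).length := by rw [List.length_set]; exact hlen
        rw [hRF, pvPop_of_long _ f j hset hlens, pvPop_of_long l f j hif hlen, hRF]

-- the sequence of first-occurrence replacements, as one pass (head case)
theorem pvFoldRF_cons (d : List (String × String)) (x : String) (xs : List String)
    (hnd : (d.map Prod.fst).Nodup)
    (hvk : ∀ kv ∈ d, ∀ kv' ∈ d, kv.2 ≠ kv'.1) :
    pvFoldRF d (x :: xs) =
      match d.find? (fun kv => kv.1 == x) with
      | some kv => kv.2 :: pvFoldRF (d.filter (fun kv => kv.1 != x)) xs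
      | none => x :: pvFoldRF d xs := by
  induction d generalizing x xs with
  | nil => simp [pvFoldRF]
  | cons kv d ih =>
    obtain ⟨k, v⟩ := kv
    have hnd' : (d.map Prod.fst).Nodup := (List.nodup_cons.1 (by simpa using hnd)).2
    have hkd : k ∉ d.map Prod.fst := (List.nodup_cons.1 (by simpa using hnd)).1
    have hvk' : ∀ a ∈ d, ∀ b ∈ d, a.2 ≠ b.1 := fun a ha b hb =>
      hvk a (List.mem_cons_of_mem _ ha) b (List.mem_cons_of_mem _ hb)
    have hfold : ∀ (l : List String), pvFoldRF ((k, v) :: d) l = pvFoldRF d (pvRF k v l) :=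
      fun l => rfl
    by_cases hx : x = k
    · subst hx
      rw [hfold, pvRF_cons_self, List.find?_cons_of_pos (by simp)]
      have hfd : d.filter (fun kv => kv.1 != x) = d :=
        List.filter_eq_self.2 (fun a ha => by
          simp only [bne_iff_ne, ne_eq]
          exact fun he => hkd (he ▸ List.mem_map_of_mem ha))
      have hfv : d.find? (fun kv => kv.1 == v) = none :=
        List.find?_eq_none.2 (fun a ha => by
          simp only [beq_iff_eq]
          exact fun he => hvk (x, v) List.mem_cons_self a (List.mem_cons_of_mem _ ha) he.symm)
      rw [ih v xs hnd' hvk', hfv]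
      simp [hfd]
    · rw [hfold, pvRF_cons_ne k v x xs hx,
        List.find?_cons_of_neg (by simp; exact fun he => hx he.symm),
        ih x (pvRF k v xs) hnd' hvk']
      cases hfx : d.find? (fun kv => kv.1 == x) with
      | none => rfl
      | some kv' =>
        have hkx : (k != x) = true := by simp; exact fun he => hx he.symm
        simp only [List.filter_cons, hkx, if_true]
        rfl

theorem pvFoldRF_eq_pvOP (d : List (String × String)) (l : List String)
    (hnd : (d.map Prod.fst).Nodup)
    (hvk : ∀ kv ∈ d, ∀ kv' ∈ d, kv.2 ≠ kv'.1) :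
    pvFoldRF d l = pvOP d l := by
  induction l generalizing d with
  | nil =>
    show d.foldl (fun acc kv => pvRF kv.1 kv.2 acc) [] = pvOP d []
    have : ∀ d' : List (String × String), d'.foldl (fun acc kv => pvRF kv.1 kv.2 acc) [] = [] := by
      intro d'
      induction d' with
      | nil => rfl
      | cons kv d' ih => simp [List.foldl_cons, pvRF_nil, ih]
    rw [this]; rfl
  | cons x xs ih =>
    rw [pvFoldRF_cons d x xs hnd hvk]
    cases hfx : d.find? (fun kv => kv.1 == x) with
    | none => rw [pvOP]; rw [hfx]; rw [ih d hnd hvk]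
    | some kv =>
      rw [pvOP]; rw [hfx]
      have hsub : (d.filter (fun kv => kv.1 != x)).Sublist d := List.filter_sublist
      refine congrArg _ (ih _ ?_ ?_)
      · exact (hsub.map Prod.fst).nodup hnd
      · exact fun a ha b hb => hvk a (hsub.mem ha) b (hsub.mem hb)

-- a Dict lookup is the first key match in its items
theorem pv_get?_eq_find? (d : PySem.Dict String String) (x : String) :
    d.get? x = (d.items.find? (fun kv => kv.1 == x)).map Prod.snd := by
  obtain ⟨items⟩ := d
  induction items with
  | nil => rfl
  | cons kv rest ih =>
    obtain ⟨k, v⟩ := kv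
    rw [PySem.Dict.get?_mk_cons]
    by_cases hk : k = x
    · subst hk; simp [List.find?_cons_of_pos]
    · rw [if_neg (by simpa using hk), List.find?_cons_of_neg (by simpa using hk)]
      exact ih

theorem pv_contains_add (s : PySem.Set String) (x k : String) :
    ((PySem.Set.add s x).contains k) = (s.contains k || k == x) := by
  rw [Bool.eq_iff_iff]
  simp [PySem.Set.mem_add]

-- first key match survives filtering by a predicate on keys that holds at that key
theorem pv_find?_key_filter (d : List (String × String)) (x : String) (q : String → Bool) :
    (d.filter (fun kv => q kv.1)).find? (fun kv => kv.1 == x)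
      = if q x then d.find? (fun kv => kv.1 == x) else none := by
  induction d with
  | nil => simp
  | cons kv d ih =>
    obtain ⟨k, v⟩ := kv
    by_cases hk : k = x
    · subst hk
      by_cases hq : q k
      · simp [hq, List.find?_cons_of_pos]
      · simp only [List.filter_cons, hq, Bool.false_eq_true, if_false, ih]
    · by_cases hq : q k
      · simp only [List.filter_cons, hq, if_true]
        rw [List.find?_cons_of_neg (p := fun kv : String × String => kv.1 == x)
            (a := (k, v)) (by simp [hk]), ih,
          List.find?_cons_of_neg (p := fun kv : String × String => kv.1 == x)
            (a := (k, v)) (by simp [hk])]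
      · simp only [List.filter_cons, hq, Bool.false_eq_true, if_false, ih]
        rw [List.find?_cons_of_neg (p := fun kv : String × String => kv.1 == x)
            (a := (k, v)) (by simp [hk])]

-- B's seen-set pass computes pvOP of the dict restricted to the unseen keys
theorem pvSwapGo (l : List String) (seen : PySem.Set String) (out : List String) :
    (l.foldl pvSwapStep (seen, out)).2
      = out ++ pvOP (pvDictB.items.filter (fun kv => !(seen.contains kv.1))) l := by
  induction l generalizing seen out with
  | nil => simp [pvOP]
  | cons x l ih =>
    have hq := pv_find?_key_filter pvDictB.items x (fun s => !(seen.contains s))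
    by_cases hxs : x ∈ seen
    · have hfF : (pvDictB.items.filter (fun kv => !(seen.contains kv.1))).find?
          (fun kv => kv.1 == x) = none := by
        rw [hq, if_neg (by simp [hxs])]
      have hstep : pvSwapStep (seen, out) x = (seen, out ++ [x]) := by
        unfold pvSwapStep
        cases PySem.Dict.get? pvDictB x <;> simp [hxs]
      rw [List.foldl_cons, hstep, ih seen (out ++ [x])]
      simp only [pvOP]
      rw [hfF]
      simp
    · have hqx : (!(seen.contains x)) = true := by
        simp only [Bool.not_eq_eq_eq_not, Bool.not_true]
        rw [Bool.eq_iff_iff]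
        simp [hxs]
      have hfF : (pvDictB.items.filter (fun kv => !(seen.contains kv.1))).find?
          (fun kv => kv.1 == x) = pvDictB.items.find? (fun kv => kv.1 == x) := by
        rw [hq, if_pos hqx]
      cases hfind : pvDictB.items.find? (fun kv => kv.1 == x) with
      | none =>
        have hg : PySem.Dict.get? pvDictB x = none := by
          rw [pv_get?_eq_find?, hfind]; rfl
        have hstep : pvSwapStep (seen, out) x = (seen, out ++ [x]) := by
          unfold pvSwapStep; rw [hg]
        rw [List.foldl_cons, hstep, ih seen (out ++ [x])]
        simp only [pvOP]
        rw [hfF, hfind]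
        simp
      | some kv =>
        have hg : PySem.Dict.get? pvDictB x = some kv.2 := by
          rw [pv_get?_eq_find?, hfind]; rfl
        have hstep : pvSwapStep (seen, out) x = (PySem.Set.add seen x, out ++ [kv.2]) := by
          unfold pvSwapStep; rw [hg]; simp [hxs]
        rw [List.foldl_cons, hstep, ih (PySem.Set.add seen x) (out ++ [kv.2])]
        have hfe : pvDictB.items.filter (fun kv => !((PySem.Set.add seen x).contains kv.1))
            = (pvDictB.items.filter (fun kv => !(seen.contains kv.1))).filter
                (fun kv => kv.1 != x) := by
          rw [List.filter_filter]
          refine List.filter_congr (fun a _ => ?_)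
          rw [pv_contains_add]
          cases hc : seen.contains a.1 <;> by_cases hax : a.1 = x <;> simp [hax, bne]
        rw [hfe]
        simp only [pvOP]
        rw [hfF, hfind]
        simp

theorem reverse_rule_eq (args : List String) : reverse_rule args = reverse_rule_alt args := by
  have hitems : pvDictB.items = pvPairsA := by decide
  have hB : reverse_rule_alt args
      = pvOP pvPairsA (pvPopRuleNum (pvPopRuleNum args "-I") "--insert") := by
    show (((pvPopRuleNum (pvPopRuleNum args "-I") "--insert").foldl pvSwapStep
        (PySem.Set.empty, ([] : List String))).2) = _
    rw [pvSwapGo _ PySem.Set.empty []]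
    rw [show pvDictB.items.filter
        (fun kv => !((PySem.Set.empty : PySem.Set String).contains kv.1)) = pvPairsA by decide]
    rfl
  rw [hB]
  show pvStepA (pvStepA (pvStepA (pvStepA (pvStepA (pvStepA args ("-A", "-D"))
      ("--append", "--delete")) ("-I", "-D")) ("--insert", "--delete")) ("-N", "-X"))
      ("--new-chain", "--delete-chain") = _
  rw [pvStepA_eq_RF args "-A" "-D" (by decide)]
  rw [pvStepA_eq_RF _ "--append" "--delete" (by decide)]
  rw [pvStepA_ins _ "-I" "-D" (Or.inl rfl)]
  rw [pvStepA_ins _ "--insert" "--delete" (Or.inr rfl)]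
  rw [pvStepA_eq_RF _ "-N" "-X" (by decide)]
  rw [pvStepA_eq_RF _ "--new-chain" "--delete-chain" (by decide)]
  rw [pvPop_RF_comm _ "--append" "--delete" "-I" (by decide) (by decide) (by decide) (by decide)]
  rw [pvPop_RF_comm _ "-A" "-D" "-I" (by decide) (by decide) (by decide) (by decide)]
  rw [pvPop_RF_comm _ "-I" "-D" "--insert" (by decide) (by decide) (by decide) (by decide)]
  rw [pvPop_RF_comm _ "--append" "--delete" "--insert"
    (by decide) (by decide) (by decide) (by decide)]
  rw [pvPop_RF_comm _ "-A" "-D" "--insert" (by decide) (by decide) (by decide) (by decide)]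
  rw [← pvFoldRF_eq_pvOP pvPairsA _ (by decide) (by decide)]
  rfl

-- ===== VERDICT (by name: the statement is the Claim_ definition above) =====
theorem reverse_rule_spec : Claim_equal_reverse_rule := by
  intro args _
  unfold Spec_reverse_rule
  exact reverse_rule_eq args
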